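-- pv_equiv track=rewrite | github.com/imehtn/TIP_102 | Unit2/sess1/v2_advancedproblems.py | num_of_time_portals
-- ===== SOURCE A (Python) =====
-- def num_of_time_portals(portals, destination):
--     #count the number of instances for every portal on the lst
--     from collections import Counter
--     count_portals = Counter(portals)
--     #start counter for pairs
--     count = 0
--     #for all portals
--     for portal in portals:
--         #to-be-concatenated string calculated here
--         required = destination[len(portal):]
--         #if the required string is indict
--         if required in count_portals:
--             # Decrease count if portal == required to avoid counting same index pairs
--             if portal == required:
--                 count += count_portals[required] - 1
--             #add the value of occurences
--             else:
--                 count += count_portals[required]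
--
--     return count
-- ===== SOURCE B (Python) =====
-- def num_of_time_portals(portals, destination):
--     # Direct pair count: for every ordered pair of distinct indices (i, j),
--     # count it when portals[j] equals what portals[i] still needs to reach destination.
--     count = 0
--     for i, p in enumerate(portals):
--         required = destination[len(p):]
--         for j, q in enumerate(portals):
--             if j != i and q == required:
--                 count += 1
--     return count
-- ===== Notes on version B (the rewrite author's own statement) =====
-- stated objective: simpler
-- what changed: Replaced the Counter frequency table plus per-portal arithmetic adjustment with a direct double loop over index pairs that counts every (i, j), i != j, with portals[j] equal to the needed suffix.
import Mathlib
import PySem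

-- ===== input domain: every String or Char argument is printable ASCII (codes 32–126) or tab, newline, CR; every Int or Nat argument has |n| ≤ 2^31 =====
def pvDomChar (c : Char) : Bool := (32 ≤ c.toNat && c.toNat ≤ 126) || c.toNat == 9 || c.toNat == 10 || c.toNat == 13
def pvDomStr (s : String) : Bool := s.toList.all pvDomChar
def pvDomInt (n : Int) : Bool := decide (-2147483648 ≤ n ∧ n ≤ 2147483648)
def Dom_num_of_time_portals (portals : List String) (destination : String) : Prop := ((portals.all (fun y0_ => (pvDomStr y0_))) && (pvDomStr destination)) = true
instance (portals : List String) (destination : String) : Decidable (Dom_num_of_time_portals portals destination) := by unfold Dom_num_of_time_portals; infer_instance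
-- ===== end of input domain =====

-- B replaces A's Counter table + adjustment by a plain double loop over index pairs (simpler, not faster).

-- ===== PORT A =====
def num_of_time_portals (portals : List String) (destination : String) : Int :=
  -- count_portals = Counter(portals); required = destination[len(portal):] (inlined aliases)
  portals.foldl (fun count portal =>
    if (PySem.Dict.counter portals).contains (PySem.Str.slice destination (some (PySem.Str.len portal)) none) then
      if portal == PySem.Str.slice destination (some (PySem.Str.len portal)) none then
        count + ((PySem.Dict.counter portals).getD (PySem.Str.slice destination (some (PySem.Str.len portal)) none) 0 - 1)
      else count + (PySem.Dict.counter portals).getD (PySem.Str.slice destination (some (PySem.Str.len portal)) none) 0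
    else count) 0

-- ===== PORT B =====
def num_of_time_portals_alt (portals : List String) (destination : String) : Int :=
  -- required = destination[len(p):] (inlined alias)
  (PySem.List.enumerate portals).foldl (fun count ip =>
    (PySem.List.enumerate portals).foldl (fun c jq =>
      if jq.1 != ip.1 && jq.2 == PySem.Str.slice destination (some (PySem.Str.len ip.2)) none
      then c + 1 else c) count) 0

-- ===== PRECONDITION & SPEC =====
def Spec_num_of_time_portals (portals : List String) (destination : String) (out : Int) : Prop := out = num_of_time_portals_alt portals destination
instance (portals : List String) (destination : String) (out : Int) : Decidable (Spec_num_of_time_portals portals destination out) := by unfold Spec_num_of_time_portals; infer_instance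

-- ===== CLAIM (what is proved, stated in full; the proofs are below) =====
def Claim_equal_num_of_time_portals : Prop := ∀ (portals : List String) (destination : String), Dom_num_of_time_portals portals destination → Spec_num_of_time_portals portals destination (num_of_time_portals portals destination)

-- ===== LEMMAS AND PROOFS =====

-- indices produced by enumerate with start s are ≥ s
lemma pv_enum_ge {α : Type} (xs : List α) : ∀ (s i : Int) (p : α),
    (i, p) ∈ PySem.List.enumerate xs s → s ≤ i := by
  induction xs with
  | nil => intro s i p h; simp [PySem.List.enumerate_nil] at h
  | cons x t ih =>
    intro s i p h
    rw [PySem.List.enumerate_cons] at h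
    rcases List.mem_cons.mp h with h | h
    · cases h; omega
    · have := ih (s + 1) i p h; omega

lemma pv_map_snd_enum {α : Type} (xs : List α) : ∀ (s : Int),
    (PySem.List.enumerate xs s).map Prod.snd = xs := by
  induction xs with
  | nil => intro s; simp [PySem.List.enumerate_nil]
  | cons x t ih =>
    intro s; rw [PySem.List.enumerate_cons]; simp [ih]

-- counting "other index j with portals[j] = r" in enumerate
lemma pv_enum_countP (r : String) : ∀ (xs : List String) (s i : Int) (p : String),
    (i, p) ∈ PySem.List.enumerate xs s →
    (((PySem.List.enumerate xs s).countP (fun jq => jq.1 != i && jq.2 == r) : Int))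
      = (xs.count r : Int) - (if p = r then 1 else 0) := by
  intro xs
  induction xs with
  | nil => intro s i p h; simp [PySem.List.enumerate_nil] at h
  | cons x t ih =>
    intro s i p h
    rw [PySem.List.enumerate_cons] at h ⊢
    rw [List.countP_cons]
    push_cast
    rcases List.mem_cons.mp h with h | h
    · -- (i, p) is the head, so i = s and p = x; every tail index differs from i
      injection h with hi hp
      subst hi; subst hp
      have htail : (PySem.List.enumerate t (i + 1)).countP (fun jq => jq.1 != i && jq.2 == r)
          = (PySem.List.enumerate t (i + 1)).countP (fun jq => jq.2 == r) := by
        apply List.countP_congr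
        intro jq hjq
        have hge := pv_enum_ge t (i + 1) jq.1 jq.2 (by simpa using hjq)
        have hne : (jq.1 != i) = true := by simp; omega
        simp [hne]
      have hcnt : (PySem.List.enumerate t (i + 1)).countP (fun jq => jq.2 == r) = t.count r := by
        conv_rhs => rw [← pv_map_snd_enum t (i + 1)]
        rw [List.count_eq_countP, List.countP_map]
        rfl
      rw [htail, hcnt]
      simp only [List.count_cons]
      by_cases hxr : p = r <;> simp [hxr]
    · -- (i, p) is in the tail, so i ≥ s + 1 ≠ s: head contributes iff x = r
      have hge := pv_enum_ge t (s + 1) i p h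
      have hne : ((s != i) : Bool) = true := by simp; omega
      rw [ih (s + 1) i p h]
      simp only [List.count_cons, hne, Bool.true_and]
      by_cases hxr : x = r
      · simp [hxr]; ring
      · simp [hxr]

-- A's per-element contribution, for elements of the list
lemma pv_A_contrib (portals : List String) (destination : String) (p : String)
    (hp : p ∈ portals) :
    (if (PySem.Dict.counter portals).contains (PySem.Str.slice destination (some (PySem.Str.len p)) none) then
       if p == PySem.Str.slice destination (some (PySem.Str.len p)) none then
         ((PySem.Dict.counter portals).getD (PySem.Str.slice destination (some (PySem.Str.len p)) none) 0 - 1)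
       else (PySem.Dict.counter portals).getD (PySem.Str.slice destination (some (PySem.Str.len p)) none) 0
     else 0)
    = (portals.count (PySem.Str.slice destination (some (PySem.Str.len p)) none) : Int)
      - (if p = PySem.Str.slice destination (some (PySem.Str.len p)) none then 1 else 0) := by
  set r := PySem.Str.slice destination (some (PySem.Str.len p)) none with hr
  rw [PySem.Dict.contains_counter, PySem.Dict.getD_counter]
  by_cases hc : portals.contains r
  · simp only [hc, if_true]
    by_cases hpr : p = r <;> simp [hpr]
  · have h0 : portals.count r = 0 := by
      rw [List.count_eq_zero]
      intro hmem
      rw [List.contains_eq_any_beq] at hc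
      exact hc (List.any_eq_true.mpr ⟨r, hmem, by simp⟩)
    have hpr : ¬ p = r := by
      intro hpr
      rw [List.contains_eq_any_beq] at hc
      exact hc (List.any_eq_true.mpr ⟨p, hp, by simp [hpr]⟩)
    simp [h0, hpr]

-- mapping a function of the element over enumerate is mapping it over the list
lemma pv_map_comp_snd_enum {α β : Type} (xs : List α) (g : α → β) : ∀ (s : Int),
    (PySem.List.enumerate xs s).map (fun ip => g ip.2) = xs.map g := by
  induction xs with
  | nil => intro s; simp [PySem.List.enumerate_nil]
  | cons x t ih =>
    intro s; rw [PySem.List.enumerate_cons]; simp [ih]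

-- ===== VERDICT (by name: the statement is the Claim_ definition above) =====
theorem num_of_time_portals_spec : Claim_equal_num_of_time_portals := by
  intro portals destination _
  unfold Spec_num_of_time_portals num_of_time_portals num_of_time_portals_alt
  -- rewrite B's inner fold as count + countP
  have hB : ((PySem.List.enumerate portals).foldl (fun count ip =>
      (PySem.List.enumerate portals).foldl (fun c jq =>
        if jq.1 != ip.1 && jq.2 == PySem.Str.slice destination (some (PySem.Str.len ip.2)) none
        then c + 1 else c) count) 0)
      = ((PySem.List.enumerate portals).map (fun ip =>
          (((PySem.List.enumerate portals).countP (fun jq =>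
            jq.1 != ip.1 && jq.2 == PySem.Str.slice destination (some (PySem.Str.len ip.2)) none) : Int)))).sum := by
    have hfun : (fun (count : Int) (ip : Int × String) =>
        (PySem.List.enumerate portals).foldl (fun c jq =>
          if jq.1 != ip.1 && jq.2 == PySem.Str.slice destination (some (PySem.Str.len ip.2)) none
          then c + 1 else c) count)
        = (fun (count : Int) (ip : Int × String) => count +
          (((PySem.List.enumerate portals).countP (fun jq =>
            jq.1 != ip.1 && jq.2 == PySem.Str.slice destination (some (PySem.Str.len ip.2)) none) : Int))) := by
      funext count ip
      exact PySem.List.foldl_count_if _ _ _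
    rw [hfun, PySem.List.foldl_add, zero_add]
  -- rewrite A's fold similarly
  have hA : (portals.foldl (fun count portal =>
      if (PySem.Dict.counter portals).contains (PySem.Str.slice destination (some (PySem.Str.len portal)) none) then
        if portal == PySem.Str.slice destination (some (PySem.Str.len portal)) none then
          count + ((PySem.Dict.counter portals).getD (PySem.Str.slice destination (some (PySem.Str.len portal)) none) 0 - 1)
        else count + (PySem.Dict.counter portals).getD (PySem.Str.slice destination (some (PySem.Str.len portal)) none) 0
      else count) 0)
      = (portals.map (fun portal =>
          if (PySem.Dict.counter portals).contains (PySem.Str.slice destination (some (PySem.Str.len portal)) none) then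
            if portal == PySem.Str.slice destination (some (PySem.Str.len portal)) none then
              ((PySem.Dict.counter portals).getD (PySem.Str.slice destination (some (PySem.Str.len portal)) none) 0 - 1)
            else (PySem.Dict.counter portals).getD (PySem.Str.slice destination (some (PySem.Str.len portal)) none) 0
          else 0)).sum := by
    have hfun : (fun (count : Int) (portal : String) =>
        if (PySem.Dict.counter portals).contains (PySem.Str.slice destination (some (PySem.Str.len portal)) none) then
          if portal == PySem.Str.slice destination (some (PySem.Str.len portal)) none then
            count + ((PySem.Dict.counter portals).getD (PySem.Str.slice destination (some (PySem.Str.len portal)) none) 0 - 1)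
          else count + (PySem.Dict.counter portals).getD (PySem.Str.slice destination (some (PySem.Str.len portal)) none) 0
        else count)
        = (fun (count : Int) (portal : String) => count +
          (if (PySem.Dict.counter portals).contains (PySem.Str.slice destination (some (PySem.Str.len portal)) none) then
            if portal == PySem.Str.slice destination (some (PySem.Str.len portal)) none then
              ((PySem.Dict.counter portals).getD (PySem.Str.slice destination (some (PySem.Str.len portal)) none) 0 - 1)
            else (PySem.Dict.counter portals).getD (PySem.Str.slice destination (some (PySem.Str.len portal)) none) 0
          else 0)) := by
      funext count portal
      split_ifs <;> ring
    rw [hfun, PySem.List.foldl_add, zero_add]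
  rw [hA, hB]
  -- both sums equal Σ (count r - [p = r])
  have hAmap : (portals.map (fun portal =>
      if (PySem.Dict.counter portals).contains (PySem.Str.slice destination (some (PySem.Str.len portal)) none) then
        if portal == PySem.Str.slice destination (some (PySem.Str.len portal)) none then
          ((PySem.Dict.counter portals).getD (PySem.Str.slice destination (some (PySem.Str.len portal)) none) 0 - 1)
        else (PySem.Dict.counter portals).getD (PySem.Str.slice destination (some (PySem.Str.len portal)) none) 0
      else 0))
      = portals.map (fun p =>
          (portals.count (PySem.Str.slice destination (some (PySem.Str.len p)) none) : Int)
          - (if p = PySem.Str.slice destination (some (PySem.Str.len p)) none then 1 else 0)) := by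
    apply List.map_congr_left
    intro p hp
    exact pv_A_contrib portals destination p hp
  have hBmap : ((PySem.List.enumerate portals).map (fun ip =>
      (((PySem.List.enumerate portals).countP (fun jq =>
        jq.1 != ip.1 && jq.2 == PySem.Str.slice destination (some (PySem.Str.len ip.2)) none) : Int))))
      = (PySem.List.enumerate portals).map (fun ip =>
          (portals.count (PySem.Str.slice destination (some (PySem.Str.len ip.2)) none) : Int)
          - (if ip.2 = PySem.Str.slice destination (some (PySem.Str.len ip.2)) none then 1 else 0)) := by
    apply List.map_congr_left
    intro ip hip
    exact pv_enum_countP _ portals 0 ip.1 ip.2 (by simpa using hip)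
  rw [hAmap, hBmap]
  -- reindex B's sum over enumerate to a sum over portals
  have : (PySem.List.enumerate portals).map (fun ip =>
      (portals.count (PySem.Str.slice destination (some (PySem.Str.len ip.2)) none) : Int)
      - (if ip.2 = PySem.Str.slice destination (some (PySem.Str.len ip.2)) none then 1 else 0))
      = portals.map (fun p =>
          (portals.count (PySem.Str.slice destination (some (PySem.Str.len p)) none) : Int)
          - (if p = PySem.Str.slice destination (some (PySem.Str.len p)) none then 1 else 0)) := by
    exact pv_map_comp_snd_enum portals
      (fun p => ((portals.count (PySem.Str.slice destination (some (PySem.Str.len p)) none) : Int)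
        - (if p = PySem.Str.slice destination (some (PySem.Str.len p)) none then 1 else 0))) 0
  rw [this]
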